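-- pv_equiv track=rewrite | github.com/BojanUSI/Python-Algorithms | Exam/ex3.py | count_horizontal
-- ===== SOURCE A (Python) =====
-- def count_horizontal(A):
--     c = 0
--     for i in range(len(A)-1):
--         if i % 2 == 1:
--             for j in range(i+1, len(A)):
--                 if j % 2 == 1:
--                     if A[i] == A[j]:
--                         c += 1
--
--     return c
-- ===== SOURCE B (Python) =====
-- def count_horizontal(A):
--     c = 0
--     seen = {}
--     for j in range(1, len(A), 2):
--         v = A[j]
--         k = seen.get(v, 0)
--         c += k
--         seen[v] = k + 1
--     return c
-- ===== Notes on version B (the rewrite author's own statement) =====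
-- stated objective: faster
-- what changed: replaces the quadratic scan over all index pairs by a single pass over the odd indices that keeps a hash counter of values seen so far and adds, for each value, the number of its earlier odd-index occurrences
import Mathlib
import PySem

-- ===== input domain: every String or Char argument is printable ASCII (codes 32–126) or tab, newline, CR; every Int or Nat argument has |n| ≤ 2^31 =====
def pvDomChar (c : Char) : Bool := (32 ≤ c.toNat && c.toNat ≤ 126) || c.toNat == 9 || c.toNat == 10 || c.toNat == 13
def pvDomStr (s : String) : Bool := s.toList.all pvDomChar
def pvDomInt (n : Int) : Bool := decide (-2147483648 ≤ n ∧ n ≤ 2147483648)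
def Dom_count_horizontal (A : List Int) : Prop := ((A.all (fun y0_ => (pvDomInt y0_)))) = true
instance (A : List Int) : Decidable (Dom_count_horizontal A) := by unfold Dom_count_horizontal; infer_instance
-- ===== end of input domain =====

-- B replaces A's quadratic scan over all index pairs by one pass over the odd
-- indices with a hash counter of values seen so far (objective: faster).

-- ===== PORT A =====
def count_horizontal (A : List Int) : Int :=
  (PySem.List.pyRange 0 ((A.length : Int) - 1) 1).foldl (fun c i =>
    if PySem.Int.mod i 2 = 1 then
      (PySem.List.pyRange (i + 1) (A.length : Int) 1).foldl (fun c j =>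
        if PySem.Int.mod j 2 = 1 then
          if PySem.List.pyGetD A i 0 = PySem.List.pyGetD A j 0 then c + 1 else c
        else c) c
    else c) 0

-- ===== PORT B =====
def count_horizontal_alt (A : List Int) : Int :=
  ((PySem.List.pyRange 1 (A.length : Int) 2).foldl
    (fun (st : Int × PySem.Dict Int Int) j =>
      let v := PySem.List.pyGetD A j 0
      let k := st.2.getD v 0
      (st.1 + k, st.2.insert v (k + 1)))
    (0, PySem.Dict.empty)).1

-- ===== PRECONDITION & SPEC =====
def Spec_count_horizontal (A : List Int) (out : Int) : Prop := out = count_horizontal_alt A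
instance (A : List Int) (out : Int) : Decidable (Spec_count_horizontal A out) := by unfold Spec_count_horizontal; infer_instance

-- ===== CLAIM (what is proved, stated in full; the proofs are below) =====
def Claim_equal_count_horizontal : Prop := ∀ (A : List Int), Dom_count_horizontal A → Spec_count_horizontal A (count_horizontal A)

-- ===== LEMMAS AND PROOFS =====

-- number of ordered pairs of positions p < q in l holding equal values
def pvPairs : List Int → Int
  | [] => 0
  | x :: xs => (xs.count x : Int) + pvPairs xs

lemma pvPairs_snoc (l : List Int) (y : Int) :
    pvPairs (l ++ [y]) = pvPairs l + (l.count y : Int) := by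
  induction l with
  | nil => simp [pvPairs]
  | cons x xs ih =>
    simp only [List.cons_append, pvPairs, ih, List.count_append, List.count_cons,
      List.count_nil]
    by_cases h : y = x
    · subst h; simp; ring
    · have h' : ¬ x = y := fun e => h e.symm
      simp [h, h']; ring

-- B's loop step on the already-fetched value
def pvStep (st : Int × PySem.Dict Int Int) (v : Int) : Int × PySem.Dict Int Int :=
  (st.1 + st.2.getD v 0, st.2.insert v (st.2.getD v 0 + 1))

lemma pvStep_snd (V : List Int) (c : Int) (d : PySem.Dict Int Int) :
    (V.foldl pvStep (c, d)).2 = V.foldl (fun d v => d.insert v (d.getD v 0 + 1)) d := by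
  induction V generalizing c d with
  | nil => rfl
  | cons x xs ih => simp [pvStep, ih]

lemma pvB_pairs (V : List Int) :
    (V.foldl pvStep (0, PySem.Dict.empty)).1 = pvPairs V := by
  induction V using List.reverseRecOn with
  | nil => rfl
  | append_singleton xs y ih =>
    rw [List.foldl_append, pvPairs_snoc, ← ih]
    show (xs.foldl pvStep (0, PySem.Dict.empty)).1
        + ((xs.foldl pvStep (0, PySem.Dict.empty)).2).getD y 0 = _
    rw [pvStep_snd, PySem.Dict.getD_foldl_insert_add_one]
    simp

-- two strictly increasing lists with the same members are equal
lemma pvSortedExt (l1 l2 : List Int) (s1 : l1.Pairwise (· < ·)) (s2 : l2.Pairwise (· < ·))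
    (h : ∀ x, x ∈ l1 ↔ x ∈ l2) : l1 = l2 := by
  have n1 : l1.Nodup := s1.imp (fun hab => ne_of_lt hab)
  have n2 : l2.Nodup := s2.imp (fun hab => ne_of_lt hab)
  exact ((List.perm_ext_iff_of_nodup n1 n2).mpr h).eq_of_pairwise
    (fun a b _ _ hab hba => absurd hba (not_lt.mpr hab.le)) s1 s2

lemma pvPairwiseOdd (n : Int) : (PySem.List.pyRange 1 n 2).Pairwise (· < ·) := by
  rw [PySem.List.pyRange_of_pos 1 n (by norm_num)]
  exact List.pairwise_lt_range.map _ (fun a b h => by omega)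

lemma pvMemOdd (n x : Int) : x ∈ PySem.List.pyRange 1 n 2 ↔ 1 ≤ x ∧ x < n ∧ x % 2 = 1 := by
  rw [PySem.List.mem_pyRange_iff_of_pos (by norm_num)]
  constructor <;> (rintro ⟨h1, h2, h3⟩; refine ⟨h1, h2, ?_⟩) <;> omega

lemma pvPairwiseFilter (a b : Int) (p : Int → Bool) :
    ((PySem.List.pyRange a b 1).filter p).Pairwise (· < ·) :=
  (PySem.List.pairwise_lt_pyRange_one a b).sublist List.filter_sublist

-- the odd members of range(a, b) are exactly range(max(a,1 or next odd)...): the two instances we need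
lemma pvOddRange (n : Int) :
    (PySem.List.pyRange 0 n 1).filter (fun j => decide (PySem.Int.mod j 2 = 1))
      = PySem.List.pyRange 1 n 2 := by
  refine pvSortedExt _ _ (pvPairwiseFilter _ _ _) (pvPairwiseOdd n) (fun x => ?_)
  rw [pvMemOdd]
  simp only [List.mem_filter, PySem.List.mem_pyRange_one, decide_eq_true_eq,
    PySem.Int.mod_eq_emod_of_pos (by norm_num : (0:Int) < 2)]
  omega

lemma pvTail (i n : Int) (hi : 0 ≤ i) :
    (PySem.List.pyRange (i + 1) n 1).filter (fun j => decide (PySem.Int.mod j 2 = 1))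
      = (PySem.List.pyRange 1 n 2).filter (fun j => decide (i < j)) := by
  refine pvSortedExt _ _ (pvPairwiseFilter _ _ _)
    ((pvPairwiseOdd n).sublist List.filter_sublist) (fun x => ?_)
  simp only [List.mem_filter, PySem.List.mem_pyRange_one, decide_eq_true_eq, pvMemOdd,
    PySem.Int.mod_eq_emod_of_pos (by norm_num : (0:Int) < 2)]
  omega

lemma pvHead (n : Int) :
    PySem.List.pyRange 1 (n - 1) 2
      = (PySem.List.pyRange 1 n 2).filter (fun i => decide (i < n - 1)) := by
  refine pvSortedExt _ _ (pvPairwiseOdd _)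
    ((pvPairwiseOdd n).sublist List.filter_sublist) (fun x => ?_)
  simp only [List.mem_filter, decide_eq_true_eq, pvMemOdd]
  omega

-- dropping zero terms of a sum behind a filter
lemma pvSum_filter (f : Int → Int) (p : Int → Prop) [DecidablePred p] :
    ∀ R : List Int, (∀ i ∈ R, ¬ p i → f i = 0) →
      (R.map f).sum = ((R.filter (fun i => decide (p i))).map f).sum := by
  intro R h
  induction R with
  | nil => rfl
  | cons x xs ih =>
    have hxs := ih (fun i hi => h i (List.mem_cons_of_mem _ hi))
    by_cases hx : p x
    · simp [hx, hxs]
    · simp [hx, hxs, h x (List.mem_cons_self) hx]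

-- the pair-sum over any strictly increasing index list equals pvPairs of its values
lemma pvG (f : Int → Int) : ∀ R : List Int, R.Pairwise (· < ·) →
    (R.map (fun i =>
      (((R.filter (fun j => decide (i < j))).map f).count (f i) : Int))).sum
      = pvPairs (R.map f) := by
  intro R h
  induction R with
  | nil => rfl
  | cons x xs ih =>
    rcases List.pairwise_cons.mp h with ⟨hx, hxs⟩
    have h1 : xs.filter (fun j => decide (x < j)) = xs :=
      List.filter_eq_self.mpr (fun j hj => by simpa using hx j hj)
    have h2 : ∀ i ∈ xs,
        ((x :: xs).filter (fun j => decide (i < j))) = xs.filter (fun j => decide (i < j)) := by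
      intro i hi
      have hni : ¬ i < x := not_lt.mpr (le_of_lt (hx i hi))
      simp [hni]
    calc ((x :: xs).map (fun i =>
          ((((x :: xs).filter (fun j => decide (i < j))).map f).count (f i) : Int))).sum
        = ((xs.map f).count (f x) : Int)
          + (xs.map (fun i =>
              (((xs.filter (fun j => decide (i < j))).map f).count (f i) : Int))).sum := by
          simp only [List.map_cons, List.sum_cons, List.filter_cons, decide_eq_true_eq,
            lt_irrefl, if_false]
          rw [h1]
          exact congrArg (fun s => ((xs.map f).count (f x) : Int) + s)
            (congrArg List.sum (List.map_congr_left (fun i hi => by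
              have hni : ¬ i < x := not_lt.mpr (le_of_lt (hx i hi))
              simp [hni])))
      _ = pvPairs ((x :: xs).map f) := by rw [ih hxs]; simp only [List.map_cons, pvPairs]

lemma pvCountP_eq_count (g : Int → Int) (v : Int) (l : List Int) :
    l.countP (fun j => decide (v = g j)) = (l.map g).count v := by
  rw [List.count_eq_countP, List.countP_map]
  exact List.countP_congr (fun j _ => by simp [eq_comm (a := v)])

-- A as a sum over its odd outer indices
lemma pvA_sum (A : List Int) :
    count_horizontal A
      = (((PySem.List.pyRange 0 ((A.length : Int) - 1) 1).filter
            (fun i => decide (PySem.Int.mod i 2 = 1))).map (fun i =>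
          (List.countP (fun j => decide (PySem.List.pyGetD A i 0 = PySem.List.pyGetD A j 0))
            ((PySem.List.pyRange (i + 1) (A.length : Int) 1).filter
              (fun j => decide (PySem.Int.mod j 2 = 1))) : Int))).sum := by
  unfold count_horizontal
  rw [PySem.List.foldl_ite_eq_foldl_filter (p := fun i => PySem.Int.mod i 2 = 1)
      (f := fun c i => (PySem.List.pyRange (i + 1) (A.length : Int) 1).foldl
        (fun c j => if PySem.Int.mod j 2 = 1 then
          if PySem.List.pyGetD A i 0 = PySem.List.pyGetD A j 0 then c + 1 else c
          else c) c)]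
  have hbody : (fun (c i : Int) =>
      (PySem.List.pyRange (i + 1) (A.length : Int) 1).foldl
        (fun c j => if PySem.Int.mod j 2 = 1 then
          if PySem.List.pyGetD A i 0 = PySem.List.pyGetD A j 0 then c + 1 else c
          else c) c)
      = fun c i => c + (List.countP (fun j => decide (PySem.List.pyGetD A i 0 = PySem.List.pyGetD A j 0))
          ((PySem.List.pyRange (i + 1) (A.length : Int) 1).filter
            (fun j => decide (PySem.Int.mod j 2 = 1))) : Int) := by
    funext c i
    rw [PySem.List.foldl_ite_eq_foldl_filter (p := fun j => PySem.Int.mod j 2 = 1)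
        (f := fun c j => if PySem.List.pyGetD A i 0 = PySem.List.pyGetD A j 0 then c + 1 else c),
      PySem.List.foldl_ite_add_one (p := fun j => PySem.List.pyGetD A i 0 = PySem.List.pyGetD A j 0)]
  rw [hbody, PySem.List.foldl_add]
  simp

-- ===== VERDICT (by name: the statement is the Claim_ definition above) =====
theorem count_horizontal_spec : Claim_equal_count_horizontal := by
  intro A _
  unfold Spec_count_horizontal
  have hB : count_horizontal_alt A
      = pvPairs ((PySem.List.pyRange 1 (A.length : Int) 2).map
          (fun j => PySem.List.pyGetD A j 0)) := by
    unfold count_horizontal_alt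
    rw [show (fun (st : Int × PySem.Dict Int Int) (j : Int) =>
          let v := PySem.List.pyGetD A j 0
          let k := st.2.getD v 0
          (st.1 + k, st.2.insert v (k + 1)))
        = fun st j => pvStep st (PySem.List.pyGetD A j 0) from rfl]
    rw [← List.foldl_map (f := fun j => PySem.List.pyGetD A j 0) (g := pvStep)]
    exact pvB_pairs _
  rw [hB, pvA_sum, pvOddRange, pvHead]
  have hterm : ∀ i ∈ (PySem.List.pyRange 1 (A.length : Int) 2).filter
      (fun i => decide (i < (A.length : Int) - 1)),
      (List.countP (fun j => decide (PySem.List.pyGetD A i 0 = PySem.List.pyGetD A j 0))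
        ((PySem.List.pyRange (i + 1) (A.length : Int) 1).filter
          (fun j => decide (PySem.Int.mod j 2 = 1))) : Int)
      = ((((PySem.List.pyRange 1 (A.length : Int) 2).filter (fun j => decide (i < j))).map
          (fun j => PySem.List.pyGetD A j 0)).count (PySem.List.pyGetD A i 0) : Int) := by
    intro i hi
    have hmem := (pvMemOdd _ i).mp (List.mem_of_mem_filter hi)
    rw [pvTail i _ (by omega), pvCountP_eq_count (fun j => PySem.List.pyGetD A j 0) (PySem.List.pyGetD A i 0)]
  rw [List.map_congr_left hterm]
  have hzero : ∀ i ∈ PySem.List.pyRange 1 (A.length : Int) 2, ¬ (i < (A.length : Int) - 1) →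
      ((((PySem.List.pyRange 1 (A.length : Int) 2).filter (fun j => decide (i < j))).map
          (fun j => PySem.List.pyGetD A j 0)).count (PySem.List.pyGetD A i 0) : Int) = 0 := by
    intro i hi hnot
    have hnil : (PySem.List.pyRange 1 (A.length : Int) 2).filter (fun j => decide (i < j)) = [] := by
      refine List.filter_eq_nil_iff.mpr (fun j hj => ?_)
      have := (pvMemOdd _ j).mp hj
      simp only [decide_eq_true_eq]
      omega
    rw [hnil]
    simp
  rw [← pvSum_filter _ _ _ hzero]
  exact pvG _ _ (pvPairwiseOdd _)
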